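-- pv_equiv track=rewrite | github.com/ktam33/aoc2024 | day21/day21.py | get_whole_path
-- ===== SOURCE A (Python) =====
-- def get_path(start, end, hole):
--     i_move = 'v' if end[0] > start[0] else '^'
--     j_move = '>' if end[1] > start[1] else '<'
--
--     i_move = i_move * abs(end[0] - start[0])
--     j_move = j_move * abs(end[1] - start[1])
--
--     j_first = j_move + i_move + 'A'
--     i_first = i_move + j_move + 'A'
--     if start[1] == hole[1] and end[0] == hole[0]:
--         return set([j_first])
--     elif start[0] == hole[0] and end[1] == hole[1]:
--         return set([i_first])
--     else:
--         return set([i_first, j_first])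
--
-- def get_whole_path(combo, grid):
--     hole = grid['X']
--     prev_paths = set()
--     combo = 'A' + combo
--     for i in range(len(combo) - 1):
--         new_paths = set()
--         new_sections = get_path(grid[combo[i]], grid[combo[i + 1]], hole)
--         if len(prev_paths) == 0:
--             new_paths = new_sections
--         else:
--             for path in prev_paths:
--                 for section in new_sections:
--                     new_paths.add(path + section)
--         prev_paths = new_paths
--
--     return prev_paths
-- ===== SOURCE B (Python) =====
-- def get_path(start, end, hole):
--     i_move = 'v' if end[0] > start[0] else '^'
--     j_move = '>' if end[1] > start[1] else '<'
--
--     i_move = i_move * abs(end[0] - start[0])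
--     j_move = j_move * abs(end[1] - start[1])
--
--     j_first = j_move + i_move + 'A'
--     i_first = i_move + j_move + 'A'
--     if start[1] == hole[1] and end[0] == hole[0]:
--         return set([j_first])
--     elif start[0] == hole[0] and end[1] == hole[1]:
--         return set([i_first])
--     else:
--         return set([i_first, j_first])
--
--
-- def get_whole_path(combo, grid):
--     # Different decomposition: build the suffix products recursively
--     # (right-to-left) instead of folding prefix concatenations into an
--     # accumulating set; dedup once at the end.
--     hole = grid['X']
--     keys = 'A' + combo
--     if len(keys) < 2:
--         return set()
--
--     def build(i):
--         if i == len(keys) - 1: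
--             return ['']
--         return [sec + rest
--                 for sec in get_path(grid[keys[i]], grid[keys[i + 1]], hole)
--                 for rest in build(i + 1)]
--
--     return set(build(0))
-- ===== Notes on version B (the rewrite author's own statement) =====
-- stated objective: alternative
-- what changed: B replaces A's left-to-right fold that accumulates prefix concatenations into a per-stage set (with an empty-accumulator special case) by a right-to-left recursion that builds all suffix products per transition and deduplicates once at the end.
import Mathlib
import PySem

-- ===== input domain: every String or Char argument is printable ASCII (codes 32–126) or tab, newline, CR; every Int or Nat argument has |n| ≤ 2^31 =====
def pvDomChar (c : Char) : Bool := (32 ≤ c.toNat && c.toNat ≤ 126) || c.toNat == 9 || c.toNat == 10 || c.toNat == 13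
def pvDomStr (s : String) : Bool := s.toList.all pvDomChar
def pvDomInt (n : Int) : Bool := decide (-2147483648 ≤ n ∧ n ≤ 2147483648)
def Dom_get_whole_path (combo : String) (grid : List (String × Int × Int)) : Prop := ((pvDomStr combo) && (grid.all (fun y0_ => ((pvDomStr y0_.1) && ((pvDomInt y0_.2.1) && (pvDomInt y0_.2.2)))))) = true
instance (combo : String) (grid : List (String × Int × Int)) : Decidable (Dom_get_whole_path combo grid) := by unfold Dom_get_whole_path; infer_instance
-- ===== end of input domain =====

-- B builds the suffix products of the per-transition option sets by right-to-left recursion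
-- and deduplicates once at the end, instead of A's left-to-right fold that accumulates
-- prefix concatenations into a fresh set at every stage (objective: alternative).


-- ===== PORT A =====

-- Python 's * n' for a string: n ≤ 0 gives '' (Int.toNat clamps exactly as Python does); exact.
def pyStrMul (s : String) (n : Int) : String := String.ofList (List.replicate n.toNat s.toList).flatten

def get_path (s e hole : Int × Int) : List String :=
  let iMove0 := if e.1 > s.1 then "v" else "^"
  let jMove0 := if e.2 > s.2 then ">" else "<"
  let iMove := pyStrMul iMove0 |e.1 - s.1|
  let jMove := pyStrMul jMove0 |e.2 - s.2|
  let jFirst := jMove ++ iMove ++ "A"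
  let iFirst := iMove ++ jMove ++ "A"
  if s.2 = hole.2 ∧ e.1 = hole.1 then [jFirst]
  else if s.1 = hole.1 ∧ e.2 = hole.2 then [iFirst]
  else PySem.Set.ofList [iFirst, jFirst]

-- the body of A's 'for i in range(len(combo) - 1)' loop, one step per adjacent pair
def gwpStep (grid : List (String × Int × Int)) (hole : Int × Int)
    (prev : List String) (pr : Char × Char) : List String :=
  match PySem.Dict.get? (⟨grid⟩ : PySem.Dict String (Int × Int)) (String.singleton pr.1),
        PySem.Dict.get? (⟨grid⟩ : PySem.Dict String (Int × Int)) (String.singleton pr.2) with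
  | some s, some e =>
    let newSections := get_path s e hole
    if prev.length = 0 then newSections
    else prev.foldl (fun np path =>
           newSections.foldl (fun np sec => PySem.Set.add np (path ++ sec)) np) PySem.Set.empty
  | _, _ => prev  -- KeyError in Python; excluded by Pre_

def get_whole_path (combo : String) (grid : List (String × Int × Int)) : List String :=
  match PySem.Dict.get? (⟨grid⟩ : PySem.Dict String (Int × Int)) "X" with
  | none => []  -- KeyError in Python; excluded by Pre_
  | some hole =>
    let cs := ("A" ++ combo).toList
    (cs.zip cs.tail).foldl (gwpStep grid hole) []

-- ===== PORT B =====

-- Source B's 'build(i)': all concatenations of one option per remaining transition, right-to-left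
def gwpBuild (grid : List (String × Int × Int)) (hole : Int × Int) :
    Char → List Char → List String
  | _, [] => [""]
  | c, d :: rest =>
    match PySem.Dict.get? (⟨grid⟩ : PySem.Dict String (Int × Int)) (String.singleton c),
          PySem.Dict.get? (⟨grid⟩ : PySem.Dict String (Int × Int)) (String.singleton d) with
    | some s, some e =>
      (get_path s e hole).flatMap (fun sec => (gwpBuild grid hole d rest).map (fun r => sec ++ r))
    | _, _ => []  -- KeyError in Python; excluded by Pre_

def get_whole_path_alt (combo : String) (grid : List (String × Int × Int)) : List String :=
  match PySem.Dict.get? (⟨grid⟩ : PySem.Dict String (Int × Int)) "X" with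
  | none => []  -- KeyError in Python; excluded by Pre_
  | some hole =>
    match combo.toList with
    | [] => PySem.Set.empty
    | d :: rest => PySem.Set.ofList (gwpBuild grid hole 'A' (d :: rest))

-- ===== PRECONDITION & SPEC =====

-- Pre_ excludes exactly the inputs where Python A raises KeyError: grid must contain the key
-- 'X', and — when the loop runs at all, i.e. combo is nonempty — every character of
-- 'A' + combo must be a key of grid.
def Pre_get_whole_path (combo : String) (grid : List (String × Int × Int)) : Prop :=
  (PySem.Dict.get? (⟨grid⟩ : PySem.Dict String (Int × Int)) "X").isSome = true ∧
  (combo ≠ "" →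
    (('A' :: combo.toList).all
      (fun c => (PySem.Dict.get? (⟨grid⟩ : PySem.Dict String (Int × Int)) (String.singleton c)).isSome)) = true)

instance (combo : String) (grid : List (String × Int × Int)) : Decidable (Pre_get_whole_path combo grid) := by
  unfold Pre_get_whole_path; infer_instance

def pvWitness_get_whole_path : String × (List (String × Int × Int)) :=
  ("02", [("X", 3, 0), ("A", 3, 2), ("0", 3, 1), ("2", 2, 1)])

def Spec_get_whole_path (combo : String) (grid : List (String × Int × Int)) (out : List String) : Prop :=
  out = get_whole_path_alt combo grid

instance (combo : String) (grid : List (String × Int × Int)) (out : List String) : Decidable (Spec_get_whole_path combo grid out) := by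
  unfold Spec_get_whole_path; infer_instance

-- ===== CLAIM (what is proved, stated in full; the proofs are below) =====
def Claim_equal_get_whole_path : Prop := ∀ (combo : String) (grid : List (String × Int × Int)), Dom_get_whole_path combo grid → Pre_get_whole_path combo grid → Spec_get_whole_path combo grid (get_whole_path combo grid)

-- ===== LEMMAS AND PROOFS =====

-- generic facts about folding PySem.Set.add

theorem mem_foldl_add {α : Type} [BEq α] [LawfulBEq α] {b : α} (l : List α) {X : List α}
    (h : b ∈ X) : b ∈ l.foldl PySem.Set.add X := by
  induction l generalizing X with
  | nil => exact h
  | cons x l ih => exact ih ((PySem.Set.mem_add X x b).2 (Or.inl h))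

theorem mem_foldl_add_self {α : Type} [BEq α] [LawfulBEq α] {b : α} {l : List α} (X : List α)
    (h : b ∈ l) : b ∈ l.foldl PySem.Set.add X := by
  induction l generalizing X with
  | nil => cases h
  | cons x l ih =>
    rcases List.mem_cons.1 h with h | h
    · exact mem_foldl_add l ((PySem.Set.mem_add X x b).2 (Or.inr h))
    · exact ih _ h

theorem add_eq_of_mem {α : Type} [BEq α] [LawfulBEq α] {b : α} {X : List α}
    (h : b ∈ X) : PySem.Set.add X b = X := by
  simp [PySem.Set.add, PySem.Set.contains, h]

theorem foldl_add_absorb {α : Type} [BEq α] [LawfulBEq α] (l : List α) (X : List α)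
    (h : ∀ b ∈ l, b ∈ X) : l.foldl PySem.Set.add X = X := by
  induction l with
  | nil => rfl
  | cons x l ih =>
    simp only [List.foldl_cons, add_eq_of_mem (h x (List.mem_cons_self))]
    exact ih (fun b hb => h b (List.mem_cons_of_mem _ hb))

theorem exists_foldl_add_append {α : Type} [BEq α] (l : List α) (s : List α) :
    ∃ E, l.foldl PySem.Set.add s = s ++ E := by
  induction l generalizing s with
  | nil => exact ⟨[], by simp⟩
  | cons x l ih =>
    simp only [List.foldl_cons]
    by_cases h : PySem.Set.contains s x = true
    · rcases ih (PySem.Set.add s x) with ⟨E, hE⟩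
      exact ⟨E, by rw [hE, PySem.Set.add, if_pos h]⟩
    · rcases ih (PySem.Set.add s x) with ⟨E, hE⟩
      refine ⟨x :: E, ?_⟩
      rw [hE, PySem.Set.add, if_neg h]
      simp

theorem foldl_add_nodup {α : Type} [BEq α] [LawfulBEq α] (l : List α) (s : List α)
    (h : (s ++ l).Nodup) : l.foldl PySem.Set.add s = s ++ l := by
  induction l generalizing s with
  | nil => simp
  | cons x l ih =>
    have hx : x ∉ s := by
      intro hm
      exact (List.disjoint_of_nodup_append h) hm List.mem_cons_self
    have : PySem.Set.add s x = s ++ [x] := by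
      simp [PySem.Set.add, PySem.Set.contains, hx]
    simp only [List.foldl_cons, this]
    have := ih (s ++ [x]) (by simpa using h)
    simpa using this
  
theorem ofList_eq_self {α : Type} [BEq α] [LawfulBEq α] (l : List α) (h : l.Nodup) :
    PySem.Set.ofList l = l := by
  have := foldl_add_nodup l [] (by simpa using h)
  simpa [PySem.Set.ofList, PySem.Set.empty] using this

-- deduplicating before a flatMap does not change the deduplicated flatMap
theorem dedup_flatMap {α β : Type} [BEq α] [LawfulBEq α] [BEq β] [LawfulBEq β]
    (f : α → List β) (l : List α) (s : List α) (X : List β)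
    (h : ∀ a ∈ s, ∀ b ∈ f a, b ∈ X) :
    ((l.foldl PySem.Set.add s).flatMap f).foldl PySem.Set.add X
      = (l.flatMap f).foldl PySem.Set.add X := by
  induction l generalizing s X with
  | nil =>
    simp only [List.foldl_nil, List.flatMap_nil]
    exact foldl_add_absorb _ X (by
      intro b hb
      rcases List.mem_flatMap.1 hb with ⟨a, ha, hba⟩
      exact h a ha b hba)
  | cons x l ih =>
    by_cases hx : PySem.Set.contains s x = true
    · have hxs : x ∈ s := by
        have := hx
        simp only [PySem.Set.contains] at this
        exact List.mem_of_elem_eq_true this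
      have hadd : PySem.Set.add s x = s := by rw [PySem.Set.add, if_pos hx]
      simp only [List.foldl_cons, hadd, List.flatMap_cons]
      rw [ih s X h, List.foldl_append, foldl_add_absorb (f x) X (fun b hb => h x hxs b hb)]
    · have hadd : PySem.Set.add s x = s ++ [x] := by rw [PySem.Set.add, if_neg hx]
      set X' := (f x).foldl PySem.Set.add X with hX'
      have hsub : ∀ a ∈ s ++ [x], ∀ b ∈ f a, b ∈ X' := by
        intro a ha b hb
        rcases List.mem_append.1 ha with ha | ha
        · exact mem_foldl_add _ (h a ha b hb)
        · rcases List.mem_singleton.1 ha with rfl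
          exact mem_foldl_add_self _ hb
      have key : ((l.foldl PySem.Set.add (s ++ [x])).flatMap f).foldl PySem.Set.add X
          = ((l.foldl PySem.Set.add (s ++ [x])).flatMap f).foldl PySem.Set.add X' := by
        rcases exists_foldl_add_append l (s ++ [x]) with ⟨E, hE⟩
        rw [hE]
        simp only [List.append_assoc, List.flatMap_append, List.foldl_append]
        rw [foldl_add_absorb (s.flatMap f) X (by
          intro b hb
          rcases List.mem_flatMap.1 hb with ⟨a, ha, hba⟩
          exact h a ha b hba)]
        rw [foldl_add_absorb (s.flatMap f) X' (by
          intro b hb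
          rcases List.mem_flatMap.1 hb with ⟨a, ha, hba⟩
          exact mem_foldl_add _ (h a ha b hba))]
        simp only [List.flatMap_cons, List.flatMap_nil, List.append_nil]
        rw [← hX', foldl_add_absorb (f x) X' (fun b hb => mem_foldl_add_self _ hb)]
      simp only [List.foldl_cons, hadd, List.flatMap_cons]
      rw [key, ih (s ++ [x]) X' hsub, List.foldl_append]

-- A's nested two-loop set construction is a fold of Set.add over the raw product list
theorem double_fold (prev secs : List String) (X : List String) :
    prev.foldl (fun np path => secs.foldl (fun np sec => PySem.Set.add np (path ++ sec)) np) X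
      = (prev.flatMap (fun p => secs.map (p ++ ·))).foldl PySem.Set.add X := by
  induction prev generalizing X with
  | nil => rfl
  | cons p prev ih =>
    simp only [List.foldl_cons, List.flatMap_cons, List.foldl_append]
    rw [← ih, ← List.foldl_map (f := (p ++ ·)) (g := PySem.Set.add)]

-- facts about get_path's result
theorem get_path_nodup (s e hole : Int × Int) : (get_path s e hole).Nodup := by
  unfold get_path
  split_ifs <;> first
    | exact List.nodup_singleton _
    | exact PySem.Set.nodup_ofList _

theorem get_path_ne_nil (s e hole : Int × Int) : get_path s e hole ≠ [] := by
  unfold get_path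
  split_ifs <;> first
    | exact List.ne_nil_of_mem ((PySem.Set.mem_ofList _ _).2 (List.mem_cons_self))
    | simp

-- the per-transition option sets, the suffix products, and the prefix-product step
def secsOf (grid : List (String × Int × Int)) (hole : Int × Int) : Char → List Char → List (List String)
  | _, [] => []
  | c, d :: rest =>
    (match PySem.Dict.get? (⟨grid⟩ : PySem.Dict String (Int × Int)) (String.singleton c),
           PySem.Dict.get? (⟨grid⟩ : PySem.Dict String (Int × Int)) (String.singleton d) with
     | some s, some e => get_path s e hole
     | _, _ => []) :: secsOf grid hole d rest

def sufProd : List (List String) → List String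
  | [] => [""]
  | S :: rest => S.flatMap (fun s => (sufProd rest).map (s ++ ·))

def prodStep (acc S : List String) : List String := acc.flatMap (fun p => S.map (p ++ ·))

theorem foldl_prodStep (secs : List (List String)) (acc : List String) :
    secs.foldl prodStep acc = acc.flatMap (fun p => (sufProd secs).map (p ++ ·)) := by
  induction secs generalizing acc with
  | nil => simp [sufProd]
  | cons S secs ih =>
    simp only [List.foldl_cons, ih, sufProd, prodStep]
    simp [List.flatMap_assoc, List.map_flatMap, List.flatMap_map, List.map_map,
      Function.comp_def, String.append_assoc]

-- B's recursion computes the suffix products of secsOf (unconditionally)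
theorem gwpBuild_eq (grid : List (String × Int × Int)) (hole : Int × Int)
    (c : Char) (rest : List Char) :
    gwpBuild grid hole c rest = sufProd (secsOf grid hole c rest) := by
  induction rest generalizing c with
  | nil => rfl
  | cons d rest ih =>
    rcases h1 : PySem.Dict.get? (⟨grid⟩ : PySem.Dict String (Int × Int)) (String.singleton c) with _ | s
    · simp [gwpBuild, secsOf, sufProd, h1]
    · rcases h2 : PySem.Dict.get? (⟨grid⟩ : PySem.Dict String (Int × Int)) (String.singleton d) with _ | e
      · simp [gwpBuild, secsOf, sufProd, h1, h2]
      · simp [gwpBuild, secsOf, sufProd, h1, h2, ih]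

theorem prodStep_ne_nil {P S : List String} (hP : P ≠ []) (hS : S ≠ []) :
    prodStep P S ≠ [] := by
  rcases P with _ | ⟨p, P⟩
  · exact absurd rfl hP
  · rcases S with _ | ⟨s, S⟩
    · exact absurd rfl hS
    · simp [prodStep]

-- A's loop, started from a deduplicated nonempty accumulator, computes the
-- deduplicated prefix-product fold
theorem A_loop (grid : List (String × Int × Int)) (hole : Int × Int) :
    ∀ (rest : List Char) (c : Char) (P : List String), P ≠ [] →
    (∀ x ∈ c :: rest, (PySem.Dict.get? (⟨grid⟩ : PySem.Dict String (Int × Int)) (String.singleton x)).isSome = true) →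
    ((c :: rest).zip rest).foldl (gwpStep grid hole) (PySem.Set.ofList P)
      = PySem.Set.ofList ((secsOf grid hole c rest).foldl prodStep P) := by
  intro rest
  induction rest with
  | nil => intro c P _ _; simp [secsOf]
  | cons d rest ih =>
    intro c P hP hkeys
    rcases Option.isSome_iff_exists.1 (hkeys c List.mem_cons_self) with ⟨s, hs⟩
    rcases Option.isSome_iff_exists.1 (hkeys d (List.mem_cons_of_mem _ List.mem_cons_self)) with ⟨e, he⟩
    have hnil : PySem.Set.ofList P ≠ [] := by
      rcases P with _ | ⟨p, P⟩
      · exact absurd rfl hP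
      · exact List.ne_nil_of_mem ((PySem.Set.mem_ofList _ _).2 List.mem_cons_self)
    have hstep : gwpStep grid hole (PySem.Set.ofList P) (c, d)
        = PySem.Set.ofList (prodStep P (get_path s e hole)) := by
      have hlen : ¬ (PySem.Set.ofList P).length = 0 := by
        simpa [List.length_eq_zero_iff] using hnil
      simp only [gwpStep, hs, he, if_neg hlen]
      rw [double_fold]
      have := dedup_flatMap (fun p => (get_path s e hole).map (p ++ ·)) P []
        PySem.Set.empty (by intro a ha; cases ha)
      simpa [PySem.Set.ofList, PySem.Set.empty, prodStep] using this
    calc ((c :: d :: rest).zip (d :: rest)).foldl (gwpStep grid hole) (PySem.Set.ofList P)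
        = ((d :: rest).zip rest).foldl (gwpStep grid hole)
            (PySem.Set.ofList (prodStep P (get_path s e hole))) := by
          simp only [List.zip_cons_cons, List.foldl_cons, hstep]
      _ = PySem.Set.ofList ((secsOf grid hole d rest).foldl prodStep
            (prodStep P (get_path s e hole))) := by
          exact ih d _ (prodStep_ne_nil hP (get_path_ne_nil s e hole))
            (fun x hx => hkeys x (List.mem_cons_of_mem _ hx))
      _ = PySem.Set.ofList ((secsOf grid hole c (d :: rest)).foldl prodStep P) := by
          simp [secsOf, hs, he]

-- ===== VERDICT (by name: the statement is the Claim_ definition above) =====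
theorem get_whole_path_spec : Claim_equal_get_whole_path := by
  intro combo grid _ hPre
  unfold Spec_get_whole_path get_whole_path get_whole_path_alt
  rcases Option.isSome_iff_exists.1 hPre.1 with ⟨hole, hX⟩
  rw [hX]
  have hcs : ("A" ++ combo).toList = 'A' :: combo.toList := by
    simp [String.toList_append]
  rcases htl : combo.toList with _ | ⟨d, rest⟩
  · simp [hcs, htl, PySem.Set.empty]
  · have hne : combo ≠ "" := by
      intro h; rw [h] at htl; cases htl
    have hkeys : ∀ x ∈ 'A' :: d :: rest,
        (PySem.Dict.get? (⟨grid⟩ : PySem.Dict String (Int × Int)) (String.singleton x)).isSome = true := by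
      have := hPre.2 hne
      rw [htl] at this
      simpa [List.all_eq_true] using this
    rcases Option.isSome_iff_exists.1 (hkeys 'A' List.mem_cons_self) with ⟨s0, hs0⟩
    rcases Option.isSome_iff_exists.1 (hkeys d (List.mem_cons_of_mem _ List.mem_cons_self)) with ⟨e0, he0⟩
    have hfirst : gwpStep grid hole [] ('A', d) = get_path s0 e0 hole := by
      simp [gwpStep, hs0, he0]
    have hofl : PySem.Set.ofList (get_path s0 e0 hole) = get_path s0 e0 hole :=
      ofList_eq_self _ (get_path_nodup s0 e0 hole)
    calc (((("A" ++ combo).toList).zip (("A" ++ combo).toList).tail).foldl (gwpStep grid hole) [])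
        = ((('A' :: d :: rest).zip (d :: rest)).foldl (gwpStep grid hole) []) := by
          rw [hcs, htl]; rfl
      _ = (((d :: rest).zip rest).foldl (gwpStep grid hole) (PySem.Set.ofList (get_path s0 e0 hole))) := by
          simp only [List.zip_cons_cons, List.foldl_cons, hfirst, hofl]
      _ = PySem.Set.ofList ((secsOf grid hole d rest).foldl prodStep (get_path s0 e0 hole)) := by
          exact A_loop grid hole rest d _ (get_path_ne_nil s0 e0 hole)
            (fun x hx => hkeys x (List.mem_cons_of_mem _ hx))
      _ = PySem.Set.ofList (sufProd (secsOf grid hole 'A' (d :: rest))) := by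
          rw [foldl_prodStep]
          simp [sufProd, secsOf, hs0, he0]
      _ = PySem.Set.ofList (gwpBuild grid hole 'A' (d :: rest)) := by
          rw [gwpBuild_eq]
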